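-- pv_equiv track=rewrite | github.com/josuemj/data-link-layer-error-handling | receptor_py/hamming/hamming.py | _failing_parities
-- ===== SOURCE A (Python) =====
-- from typing import List, Tuple
--
-- def _failing_parities(bits: List[int], parity_positions: List[int]) -> List[int]:
--     """Lista de posiciones de paridad que fallan (para reportar)."""
--     n = len(bits)
--     fails = []
--     for p in parity_positions:
--         parity = 0
--         for i in range(p - 1, n, 2 * p):
--             parity ^= sum(bits[i : i + p]) % 2
--         if parity != 0:
--             fails.append(p)
--     return fails
-- ===== SOURCE B (Python) =====
-- from typing import List
--
-- def _failing_parities(bits: List[int], parity_positions: List[int]) -> List[int]: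
--     """Lista de posiciones de paridad que fallan (para reportar)."""
--     n = len(bits)
--     pre = [0]          # pre[k] = parity (XOR) of bits[:k]
--     acc = 0
--     for b in bits:
--         acc ^= b & 1
--         pre.append(acc)
--     fails = []
--     for p in parity_positions:
--         parity = 0
--         i = p - 1
--         while 0 <= i < n:
--             j = n if i + p > n else i + p
--             parity ^= pre[i] ^ pre[j]
--             i += 2 * p
--         if parity != 0:
--             fails.append(p)
--     return fails
-- ===== Notes on version B (the rewrite author's own statement) =====
-- stated objective: faster
-- what changed: B builds a prefix-parity array once so each block's parity is an O(1) xor of two prefix values, replacing A's O(p) slice sum per block.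
import Mathlib
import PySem

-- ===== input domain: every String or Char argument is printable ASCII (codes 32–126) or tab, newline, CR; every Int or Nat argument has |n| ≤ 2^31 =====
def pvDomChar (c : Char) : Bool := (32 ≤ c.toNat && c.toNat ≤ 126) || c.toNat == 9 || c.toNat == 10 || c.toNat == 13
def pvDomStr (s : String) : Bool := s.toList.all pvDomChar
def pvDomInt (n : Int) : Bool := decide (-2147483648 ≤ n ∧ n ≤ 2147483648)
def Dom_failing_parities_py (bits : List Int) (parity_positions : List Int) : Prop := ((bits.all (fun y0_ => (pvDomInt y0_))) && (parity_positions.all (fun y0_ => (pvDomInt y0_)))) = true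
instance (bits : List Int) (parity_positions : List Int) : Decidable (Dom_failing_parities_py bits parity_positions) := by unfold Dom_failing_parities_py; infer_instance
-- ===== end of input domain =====

-- B replaces A's per-block slice sums by a prefix-parity array built once, making each block parity an O(1) xor.


-- ===== PORT A =====
def failing_parities_py (bits : List Int) (parity_positions : List Int) : List Int :=
  let n : Int := PySem.List.len bits
  parity_positions.foldl (fun fails p =>
    let parity : Int := (PySem.List.pyRange (p - 1) n (2 * p)).foldl
      (fun parity i =>
        PySem.Int.bxor parity
          (PySem.Int.mod (PySem.List.slice bits (some i) (some (i + p))).sum 2)) 0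
    if parity ≠ 0 then fails ++ [p] else fails) []

-- ===== PORT B =====
-- the 'while 0 <= i < n' loop of Source B; fuel bounds the iteration count (bits.length + 1 always suffices)
def pvAltLoop (pre : List Int) (n p : Int) : Nat → Int → Int → Int
  | 0, _, parity => parity
  | fuel+1, i, parity =>
    if 0 ≤ i ∧ i < n then
      let j := if n < i + p then n else i + p
      pvAltLoop pre n p fuel (i + 2 * p)
        (PySem.Int.bxor parity
          (PySem.Int.bxor (PySem.List.pyGetD pre i 0) (PySem.List.pyGetD pre j 0)))
    else parity

def failing_parities_py_alt (bits : List Int) (parity_positions : List Int) : List Int :=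
  let n : Int := PySem.List.len bits
  let pre := (bits.foldl (fun (st : List Int × Int) b =>
      let acc := PySem.Int.bxor st.2 (PySem.Int.band b 1)
      (st.1 ++ [acc], acc)) ([0], 0)).1
  parity_positions.foldl (fun fails p =>
    let parity := pvAltLoop pre n p (bits.length + 1) (p - 1) 0
    if parity ≠ 0 then fails ++ [p] else fails) []

-- ===== PRECONDITION & SPEC =====
-- Pre_ excludes only 0 ∈ parity_positions, where Python's range(p-1, n, 0) raises ValueError.
def Pre_failing_parities_py (bits : List Int) (parity_positions : List Int) : Prop :=
  (0 : Int) ∉ parity_positions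
instance (bits : List Int) (parity_positions : List Int) : Decidable (Pre_failing_parities_py bits parity_positions) := by unfold Pre_failing_parities_py; infer_instance
def pvWitness_failing_parities_py : List Int × List Int := ([1, 0, 1], [1, 2])

def Spec_failing_parities_py (bits : List Int) (parity_positions : List Int) (out : List Int) : Prop := out = failing_parities_py_alt bits parity_positions
instance (bits : List Int) (parity_positions : List Int) (out : List Int) : Decidable (Spec_failing_parities_py bits parity_positions out) := by unfold Spec_failing_parities_py; infer_instance

-- ===== CLAIM (what is proved, stated in full; the proofs are below) =====
def Claim_equal_failing_parities_py : Prop := ∀ (bits : List Int) (parity_positions : List Int), Dom_failing_parities_py bits parity_positions → Pre_failing_parities_py bits parity_positions → Spec_failing_parities_py bits parity_positions (failing_parities_py bits parity_positions)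
-- ===== LEMMAS AND PROOFS =====

-- prefix-sum parity: pvS bits k = (sum of the first k bits) mod 2
def pvS (bits : List Int) (k : Nat) : Int := (bits.take k).sum % 2

theorem pv_bxor_emod (a b : Int) :
    PySem.Int.bxor (a % 2) (b % 2) = (a + b) % 2 := by
  rcases Int.emod_two_eq a with ha | ha <;> rcases Int.emod_two_eq b with hb | hb <;>
    rw [ha, hb]
  · have h : (a + b) % 2 = 0 := by omega
    rw [h]; decide
  · have h : (a + b) % 2 = 1 := by omega
    rw [h]; decide
  · have h : (a + b) % 2 = 1 := by omega
    rw [h]; decide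
  · have h : (a + b) % 2 = 0 := by omega
    rw [h]; decide

-- B's prefix fold computes exactly the list of prefix parities
theorem pv_pre_eq (bits : List Int) :
    (bits.foldl (fun (st : List Int × Int) b =>
      let acc := PySem.Int.bxor st.2 (PySem.Int.band b 1)
      (st.1 ++ [acc], acc)) ([0], 0))
    = ((List.range (bits.length + 1)).map (fun k => pvS bits k), pvS bits bits.length) := by
  induction bits using List.reverseRecOn with
  | nil => simp [pvS]
  | append_singleton xs b ih =>
    rw [List.foldl_append, ih]
    simp only [List.foldl_cons, List.foldl_nil]
    have hlen : (xs ++ [b]).length = xs.length + 1 := by simp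
    have hS : ∀ k : Nat, k ≤ xs.length → pvS (xs ++ [b]) k = pvS xs k := by
      intro k hk
      unfold pvS
      rw [List.take_append_of_le_length hk]
    have hacc : PySem.Int.bxor (pvS xs xs.length) (PySem.Int.band b 1)
        = pvS (xs ++ [b]) (xs.length + 1) := by
      rw [PySem.Int.band_one, PySem.Int.mod_eq_emod_of_pos (by norm_num)]
      unfold pvS
      rw [List.take_length]
      have ht : (xs ++ [b]).take (xs.length + 1) = xs ++ [b] :=
        List.take_of_length_le (by simp)
      rw [ht, List.sum_append]
      simpa using pv_bxor_emod xs.sum b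
    have hmap : List.map (fun k => pvS (xs ++ [b]) k) (List.range ((xs ++ [b]).length + 1))
        = List.map (fun k => pvS xs k) (List.range (xs.length + 1))
          ++ [pvS (xs ++ [b]) (xs.length + 1)] := by
      rw [hlen, List.range_succ, List.map_append]
      congr 1
      apply List.map_congr_left
      intro k hk
      exact hS k (by simp only [List.mem_range] at hk; omega)
    rw [hmap, hlen, hacc]

theorem pv_pre_get (bits : List Int) (k : Int) (hk : 0 ≤ k) (hk2 : k ≤ (bits.length : Int)) :
    PySem.List.pyGetD ((List.range (bits.length + 1)).map (fun k => pvS bits k)) k 0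
    = pvS bits k.toNat := by
  rw [PySem.List.pyGetD_of_nonneg _ _ hk]
  rw [List.getD_eq_getElem?_getD, List.getElem?_map, List.getElem?_range (by omega)]
  simp

-- A's block parity equals B's xor of two prefix parities (0 ≤ i, 1 ≤ p)
theorem pv_block_eq (bits : List Int) (i p : Int) (hi : 0 ≤ i) (hp : 1 ≤ p) :
    PySem.Int.mod (PySem.List.slice bits (some i) (some (i + p))).sum 2
    = PySem.Int.bxor (pvS bits i.toNat)
        (pvS bits (if (bits.length : Int) < i + p then bits.length else (i + p).toNat)) := by
  rw [PySem.Int.mod_eq_emod_of_pos (by norm_num : (0:Int) < 2)]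
  rw [PySem.List.slice_toNat bits hi (by omega)]
  set a := i.toNat with ha
  set c := (i + p).toNat - a with hc
  have hsum : (bits.take (a + c)).sum
      = (bits.take a).sum + ((bits.drop a).take c).sum := by
    rw [List.take_add, List.sum_append]
  have hkey : ((bits.drop a).take c).sum
      = (bits.take (a + c)).sum - (bits.take a).sum := by omega
  rw [hkey]
  by_cases hcase : (bits.length : Int) < i + p
  · rw [if_pos hcase]
    have htake : bits.take (a + c) = bits := List.take_of_length_le (by omega)
    unfold pvS
    rw [htake, pv_bxor_emod, List.take_length]
    omega
  · rw [if_neg hcase]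
    unfold pvS
    rw [pv_bxor_emod]
    have : a + c = (i + p).toNat := by omega
    rw [this]
    omega

-- positive-step range unrolls one element at a time
theorem pv_pyRange_cons {a b s : Int} (hs : 0 < s) (hab : a < b) :
    PySem.List.pyRange a b s = a :: PySem.List.pyRange (a + s) b s := by
  rw [PySem.List.pyRange_of_pos _ _ hs, PySem.List.pyRange_of_pos _ _ hs, if_pos hab]
  have hq : (b - a + s - 1) / s = (b - a - 1) / s + 1 := by
    rw [show b - a + s - 1 = b - a - 1 + 1 * s by ring,
      Int.add_mul_ediv_right _ _ (by omega : s ≠ 0)]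
  have hnn : 0 ≤ (b - a - 1) / s := Int.ediv_nonneg (by omega) (by omega)
  have e2 : b - (a + s) + s - 1 = b - a - 1 := by ring
  by_cases h : a + s < b
  · rw [if_pos h, e2, hq,
      show ((b - a - 1) / s + 1).toNat = ((b - a - 1) / s).toNat + 1 by omega,
      List.range_succ_eq_map]
    simp only [List.map_cons, List.map_map]
    congr 1
    · norm_num
    · apply List.map_congr_left
      intro k _
      simp only [Function.comp_apply]
      push_cast
      ring
  · rw [if_neg h]
    have h0 : (b - a - 1) / s = 0 :=
      Int.ediv_eq_zero_of_lt (by omega) (by omega)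
    rw [hq, h0]
    norm_num

theorem pv_pyRange_nil {a b s : Int} (hs : s < 0) (hab : a ≤ b) :
    PySem.List.pyRange a b s = [] := by
  simp only [PySem.List.pyRange]
  rw [if_neg (by omega : ¬ s = 0), if_neg (by omega : ¬ (0:Int) < s),
    if_neg (by omega : ¬ b < a)]
  simp

theorem pvAltLoop_succ_pos (pre : List Int) (n p : Int) (fuel : Nat) (i parity : Int)
    (h : 0 ≤ i ∧ i < n) :
    pvAltLoop pre n p (fuel + 1) i parity
    = pvAltLoop pre n p fuel (i + 2 * p)
        (PySem.Int.bxor parity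
          (PySem.Int.bxor (PySem.List.pyGetD pre i 0)
            (PySem.List.pyGetD pre (if n < i + p then n else i + p) 0))) := by
  rw [pvAltLoop]
  simp [h]

theorem pvAltLoop_succ_neg (pre : List Int) (n p : Int) (fuel : Nat) (i parity : Int)
    (h : ¬ (0 ≤ i ∧ i < n)) :
    pvAltLoop pre n p (fuel + 1) i parity = parity := by
  rw [pvAltLoop]
  simp [h]

-- the loop correspondence for 1 ≤ p
theorem pv_loop_eq (bits : List Int) (p : Int) (hp : 1 ≤ p) :
    ∀ (fuel : Nat) (i parity : Int), 0 ≤ i → (bits.length : Int) - i ≤ 2 * p * fuel →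
    (PySem.List.pyRange i (bits.length : Int) (2 * p)).foldl
      (fun parity i =>
        PySem.Int.bxor parity
          (PySem.Int.mod (PySem.List.slice bits (some i) (some (i + p))).sum 2)) parity
    = pvAltLoop ((List.range (bits.length + 1)).map (fun k => pvS bits k))
        (bits.length : Int) p fuel i parity := by
  have hs : (0:Int) < 2 * p := by omega
  intro fuel
  induction fuel with
  | zero =>
    intro i parity hi hb
    have hni : (bits.length : Int) ≤ i := by
      simp only [Nat.cast_zero, mul_zero] at hb
      omega
    rw [PySem.List.pyRange_of_pos _ _ hs, if_neg (by omega)]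
    simp [pvAltLoop]
  | succ fuel ih =>
    intro i parity hi hb
    by_cases hlt : i < (bits.length : Int)
    · rw [pv_pyRange_cons hs hlt, List.foldl_cons,
        pvAltLoop_succ_pos _ _ _ _ _ _ ⟨hi, hlt⟩,
        pv_pre_get bits i hi (by omega),
        pv_pre_get bits _ (by split <;> omega) (by split <;> omega)]
      have hj : (if (bits.length : Int) < i + p then (bits.length : Int) else i + p).toNat
          = (if (bits.length : Int) < i + p then bits.length else (i + p).toNat) := by
        split <;> omega
      rw [hj, ← pv_block_eq bits i p hi hp]
      apply ih
      · omega
      · push_cast at hb ⊢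
        nlinarith
    · rw [PySem.List.pyRange_of_pos _ _ hs, if_neg (by omega),
        pvAltLoop_succ_neg _ _ _ _ _ _ (by omega)]
      simp

-- ===== VERDICT (by name: the statement is the Claim_ definition above) =====
theorem failing_parities_py_spec : Claim_equal_failing_parities_py := by
  intro bits pps _ hpre
  unfold Spec_failing_parities_py failing_parities_py failing_parities_py_alt
  simp only [PySem.List.len_eq]
  have hpre2 : (bits.foldl (fun (st : List Int × Int) b =>
      let acc := PySem.Int.bxor st.2 (PySem.Int.band b 1)
      (st.1 ++ [acc], acc)) ([0], 0)).1
    = (List.range (bits.length + 1)).map (fun k => pvS bits k) := by rw [pv_pre_eq]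
  simp only [hpre2]
  apply PySem.List.foldl_congr_mem
  intro fails p hp
  have hp0 : p ≠ 0 := fun h => hpre (h ▸ hp)
  have hpar : (PySem.List.pyRange (p - 1) (bits.length : Int) (2 * p)).foldl
      (fun parity i =>
        PySem.Int.bxor parity
          (PySem.Int.mod (PySem.List.slice bits (some i) (some (i + p))).sum 2)) 0
      = pvAltLoop ((List.range (bits.length + 1)).map (fun k => pvS bits k))
          (bits.length : Int) p (bits.length + 1) (p - 1) 0 := by
    rcases lt_or_gt_of_ne hp0 with hneg | hpos
    · rw [pv_pyRange_nil (by omega) (by omega),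
        pvAltLoop_succ_neg _ _ _ _ _ _ (by omega)]
      simp
    · have h1 : 1 ≤ p := by omega
      apply pv_loop_eq bits p h1
      · omega
      · have : (bits.length : Int) + 1 ≤ 2 * p * ((bits.length : Int) + 1) := by nlinarith
        push_cast
        omega
  simp only [hpar]
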